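-- pv_equiv track=rewrite | github.com/sandhani01/Hand-writing-generator | projects/renderer.py | estimate_space_width
-- ===== SOURCE A (Python) =====
-- def estimate_space_width(space_run, cfg):
--     total = 0
--
--     for char in space_run:
--         if char == "\t":
--             total += cfg["word_spacing"] * 4
--         else:
--             total += cfg["word_spacing"]
--
--     return int(total)
-- ===== SOURCE B (Python) =====
-- def estimate_space_width(space_run, cfg):
--     if not space_run:
--         return 0
--     return int(cfg["word_spacing"] * (len(space_run) + 3 * space_run.count("\t")))
-- ===== Notes on version B (the rewrite author's own statement) =====
-- stated objective: simpler
-- what changed: Replaces the per-character accumulating loop by a closed form: width = word_spacing * (len(space_run) + 3 * number of tabs), computed from one length and one count.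
import Mathlib
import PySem

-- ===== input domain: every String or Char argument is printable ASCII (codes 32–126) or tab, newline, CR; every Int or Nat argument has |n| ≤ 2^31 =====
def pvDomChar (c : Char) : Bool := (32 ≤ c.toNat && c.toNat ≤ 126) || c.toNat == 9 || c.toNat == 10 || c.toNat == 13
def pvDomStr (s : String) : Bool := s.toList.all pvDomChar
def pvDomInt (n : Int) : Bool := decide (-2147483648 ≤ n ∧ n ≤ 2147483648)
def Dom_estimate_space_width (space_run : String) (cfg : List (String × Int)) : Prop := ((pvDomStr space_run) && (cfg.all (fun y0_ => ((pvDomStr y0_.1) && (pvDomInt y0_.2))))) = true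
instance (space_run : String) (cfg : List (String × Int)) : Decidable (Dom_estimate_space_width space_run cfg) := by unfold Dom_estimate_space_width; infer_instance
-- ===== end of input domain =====

-- B replaces A's per-character accumulating loop by the closed form
-- word_spacing * (len + 3 * tab_count); the return value is proved equal on Pre_.

-- cfg["word_spacing"]: first-match association-list lookup (dict convention);
-- the `getD 0` default is never reached inside Pre_, which requires the key present
-- whenever the string is nonempty (on other inputs Python A raises KeyError).
def pvWordSpacing (cfg : List (String × Int)) : Int :=
  ((cfg.find? (fun p => p.1 == "word_spacing")).map Prod.snd).getD 0

-- ===== PORT A =====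
def estimate_space_width (space_run : String) (cfg : List (String × Int)) : Int :=
  space_run.toList.foldl
    (fun total c =>
      if c = '\t' then total + pvWordSpacing cfg * 4
      else total + pvWordSpacing cfg) 0

-- ===== PORT B =====
def estimate_space_width_alt (space_run : String) (cfg : List (String × Int)) : Int :=
  if space_run.toList = [] then 0
  else pvWordSpacing cfg *
    ((space_run.toList.length : Int) + 3 * (PySem.Str.count space_run "\t" : Int))

-- ===== PRECONDITION & SPEC =====
-- Pre_ excludes exactly the inputs where Python A raises KeyError: a nonempty
-- space_run with no "word_spacing" key in cfg (B raises there too).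
def Pre_estimate_space_width (space_run : String) (cfg : List (String × Int)) : Prop :=
  space_run.toList = [] ∨ (cfg.find? (fun p => p.1 == "word_spacing")).isSome = true
instance (space_run : String) (cfg : List (String × Int)) : Decidable (Pre_estimate_space_width space_run cfg) := by unfold Pre_estimate_space_width; infer_instance

def pvWitness_estimate_space_width : String × (List (String × Int)) := ("a\t ", [("word_spacing", 2)])

def Spec_estimate_space_width (space_run : String) (cfg : List (String × Int)) (out : Int) : Prop := out = estimate_space_width_alt space_run cfg
instance (space_run : String) (cfg : List (String × Int)) (out : Int) : Decidable (Spec_estimate_space_width space_run cfg out) := by unfold Spec_estimate_space_width; infer_instance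

-- ===== CLAIM (what is proved, stated in full; the proofs are below) =====
def Claim_equal_estimate_space_width : Prop := ∀ (space_run : String) (cfg : List (String × Int)), Dom_estimate_space_width space_run cfg → Pre_estimate_space_width space_run cfg → Spec_estimate_space_width space_run cfg (estimate_space_width space_run cfg)

-- ===== LEMMAS AND PROOFS =====

-- Chars.count.go with the single-character needle '\t' counts occurrences.
theorem pv_count_go_tab (l : List Char) : ∀ (fuel acc : Nat), l.length ≤ fuel →
    PySem.Chars.count.go ['\t'] fuel l acc = acc + l.count '\t' := by
  induction l with
  | nil => intro fuel acc _; cases fuel <;> simp [PySem.Chars.count.go]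
  | cons h t ih =>
    intro fuel acc hle
    cases fuel with
    | zero => simp at hle
    | succ n =>
      simp only [PySem.Chars.count.go]
      by_cases hh : h = '\t'
      · subst hh
        rw [show List.isPrefixOf ['\t'] ('\t' :: t) = true from by simp [List.isPrefixOf],
            if_pos rfl]
        show PySem.Chars.count.go ['\t'] n (List.drop 1 ('\t' :: t)) (acc + 1) = _
        rw [List.drop_one, List.tail_cons, ih n (acc + 1) (by simpa using hle)]
        simp [List.count_cons]
        omega
      · rw [show List.isPrefixOf ['\t'] (h :: t) = false from by
              simp [List.isPrefixOf]
              intro hc; exact absurd hc.symm hh]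
        simp only [Bool.false_eq_true, if_false]
        rw [ih n acc (by simpa using Nat.le_of_succ_le_succ hle)]
        simp [hh]

theorem pv_str_count_tab (s : String) :
    PySem.Str.count s "\t" = s.toList.count '\t' := by
  rw [PySem.Str.count_eq]
  show PySem.Chars.count s.toList ['\t'] = _
  unfold PySem.Chars.count
  simp only [List.isEmpty_iff]
  rw [if_neg (by simp)]
  simpa using pv_count_go_tab s.toList s.toList.length 0 le_rfl

theorem pv_foldl_closed (w : Int) (l : List Char) : ∀ (acc : Int),
    l.foldl (fun total c => if c = '\t' then total + w * 4 else total + w) acc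
      = acc + w * ((l.length : Int) + 3 * (l.count '\t' : Int)) := by
  induction l with
  | nil => intro acc; simp
  | cons h t ih =>
    intro acc
    simp only [List.foldl_cons, List.count_cons, List.length_cons]
    by_cases hh : h = '\t'
    · rw [if_pos hh, ih]
      simp [hh]; ring
    · rw [if_neg hh, ih]
      simp [hh]; ring

-- ===== VERDICT (by name: the statement is the Claim_ definition above) =====
theorem estimate_space_width_spec : Claim_equal_estimate_space_width := by
  intro space_run cfg _ _
  unfold Spec_estimate_space_width estimate_space_width estimate_space_width_alt
  rw [pv_str_count_tab, pv_foldl_closed]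
  by_cases h : space_run.toList = [] <;> simp [h]
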